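-- pv_equiv track=rewrite | github.com/nobleator/bus-opt | betterbus.py | valid_route
-- ===== SOURCE A (Python) =====
-- def valid_route(route):
--     """
--     Returns False if the route has sub-tours or same-node edges.
--     """
--     edges = []
--     for edge in route:
--         if edge[0] == edge[1]:
--             return False
--         if len(edges) > 0 and edge[0] != edges[-1][1]:
--             return False
--         edges.append(edge)
--     return True
-- ===== SOURCE B (Python) =====
-- def valid_route(route):
--     """
--     Returns False if the route has sub-tours or same-node edges.
--     """
--     r = list(route)
--     if not r:
--         return True
--     # Reconstruct the walk's node path, rebuild the edge list it induces,
--     # and check the given route is exactly that rebuilt list with no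
--     # repeated consecutive node.
--     nodes = [r[0][0]] + [e[1] for e in r]
--     rebuilt = list(zip(nodes, nodes[1:]))
--     return r == rebuilt and all(a != b for a, b in rebuilt)
-- ===== Notes on version B (the rewrite author's own statement) =====
-- stated objective: alternative
-- what changed: Instead of scanning edges with maintained state, B changes representation: it extracts the induced node path, rebuilds the edge list that path would generate, and declares the route valid iff it equals the rebuilt list and the path never repeats a node consecutively.
import Mathlib
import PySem

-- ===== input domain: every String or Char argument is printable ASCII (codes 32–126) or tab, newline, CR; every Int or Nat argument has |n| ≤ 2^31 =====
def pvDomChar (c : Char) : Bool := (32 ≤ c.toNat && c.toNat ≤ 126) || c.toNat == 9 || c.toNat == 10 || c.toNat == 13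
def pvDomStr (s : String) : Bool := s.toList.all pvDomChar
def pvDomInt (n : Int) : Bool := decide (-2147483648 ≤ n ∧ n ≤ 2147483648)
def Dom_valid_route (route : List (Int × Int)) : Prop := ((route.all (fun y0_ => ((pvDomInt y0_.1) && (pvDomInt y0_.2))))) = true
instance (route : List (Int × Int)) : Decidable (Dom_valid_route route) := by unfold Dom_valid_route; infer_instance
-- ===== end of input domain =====

-- B replaces A's stateful edge scan by a change of representation: rebuild the
-- edge list induced by the route's node path and compare; objective: alternative.


-- ===== PORT A =====
-- loop over route, carrying the accumulated `edges` list exactly as A does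
def valid_route_go (edges : List (Int × Int)) : List (Int × Int) → Bool
  | [] => true
  | e :: rest =>
    if e.1 = e.2 then false
    else if edges.length > 0 ∧ (PySem.List.pyGet? edges (-1)).map Prod.snd ≠ some e.1 then false
    else valid_route_go (edges ++ [e]) rest

def valid_route (route : List (Int × Int)) : Bool := valid_route_go [] route

-- ===== PORT B =====
-- Source B: empty guard, then nodes = head start :: all end nodes, rebuilt = zip of
-- the path with its tail; route valid iff it equals rebuilt and the path never
-- repeats a node consecutively.
def valid_route_alt (route : List (Int × Int)) : Bool :=
  match route with
  | [] => true
  | e :: _ =>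
    let nodes : List Int := e.1 :: route.map Prod.snd
    let rebuilt := nodes.zip nodes.tail
    (route == rebuilt) && rebuilt.all (fun p => p.1 != p.2)

-- ===== PRECONDITION & SPEC =====
def Spec_valid_route (route : List (Int × Int)) (out : Bool) : Prop := out = valid_route_alt route
instance (route : List (Int × Int)) (out : Bool) : Decidable (Spec_valid_route route out) := by unfold Spec_valid_route; infer_instance

-- ===== CLAIM (what is proved, stated in full; the proofs are below) =====
def Claim_equal_valid_route : Prop := ∀ (route : List (Int × Int)), Dom_valid_route route → Spec_valid_route route (valid_route route)

-- ===== LEMMAS AND PROOFS =====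
-- A's loop only consults the last accumulated edge; characterise it by that edge.
lemma valid_route_go_last (l : List (Int × Int)) :
    ∀ (pre : List (Int × Int)) (x : Int × Int),
      valid_route_go (pre ++ [x]) l =
        ((l.all (fun e => e.1 != e.2)) &&
         (((x :: l).zip l).all (fun pq => pq.1.2 == pq.2.1))) := by
  induction l with
  | nil => intro pre x; simp [valid_route_go]
  | cons e rest ih =>
    intro pre x
    simp only [valid_route_go, PySem.List.pyGet?_neg_one]
    by_cases h1 : e.1 = e.2
    · simp [h1]
    · by_cases h2 : x.2 = e.1
      · have : ¬ ((pre ++ [x]).length > 0 ∧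
            ((pre ++ [x]).getLast?).map Prod.snd ≠ some e.1) := by
          simp [List.getLast?_append, h2]
        rw [if_neg h1, if_neg this]
        rw [ih (pre ++ [x]) e]
        simp [h1, h2, Bool.and_assoc]
      · have : ((pre ++ [x]).length > 0 ∧
            ((pre ++ [x]).getLast?).map Prod.snd ≠ some e.1) := by
          constructor
          · simp
          · simp [List.getLast?_append, h2]
        rw [if_neg h1, if_pos this]
        simp [h2]

-- both sides against the two-scan characterisation
lemma valid_route_char (route : List (Int × Int)) :
    valid_route route =
      ((route.all (fun e => e.1 != e.2)) &&
       ((route.zip route.tail).all (fun pq => pq.1.2 == pq.2.1))) := by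
  cases route with
  | nil => rfl
  | cons e rest =>
    simp only [valid_route, valid_route_go]
    by_cases h1 : e.1 = e.2
    · simp [h1]
    · have : ¬ (([] : List (Int × Int)).length > 0 ∧
          (PySem.List.pyGet? ([] : List (Int × Int)) (-1)).map Prod.snd ≠ some e.1) := by
        simp
      rw [if_neg h1, if_neg this]
      show valid_route_go ([] ++ [e]) rest = _
      rw [valid_route_go_last rest [] e]
      simp [h1, Bool.and_assoc]

-- B's "route equals rebuilt path edges ∧ path has no equal neighbours",
-- generalised over the starting node a.
lemma alt_aux (a : Int) (l : List (Int × Int)) :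
    ((l == (a :: l.map Prod.snd).zip (l.map Prod.snd)) &&
     (((a :: l.map Prod.snd).zip (l.map Prod.snd)).all (fun p => p.1 != p.2)))
    = ((match l with | [] => true | f :: _ => f.1 == a) &&
       (l.all (fun e => e.1 != e.2)) &&
       ((l.zip l.tail).all (fun pq => pq.1.2 == pq.2.1))) := by
  induction l generalizing a with
  | nil => simp
  | cons f rest ih =>
    have h := ih f.2
    rw [Bool.eq_iff_iff] at h ⊢
    cases rest with
    | nil =>
      simp only [List.map_cons, List.map_nil, List.zip_cons_cons,
        List.all_cons, List.all_nil, List.cons_beq_cons, Bool.and_eq_true, beq_iff_eq,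
        bne_iff_ne, ne_eq, List.tail_cons, Prod.ext_iff, and_true,
        Bool.and_true, List.zip_nil_right]
      constructor
      · rintro ⟨h1, h2⟩; subst h1; exact ⟨rfl, h2⟩
      · rintro ⟨h1, h2⟩; subst h1; exact ⟨rfl, h2⟩
    | cons g rs =>
      simp only [List.map_cons, List.zip_cons_cons, List.all_cons, List.cons_beq_cons,
        Bool.and_eq_true, beq_iff_eq, bne_iff_ne, ne_eq, List.tail_cons, Prod.ext_iff] at h ⊢
      constructor
      · rintro ⟨⟨⟨h1, -⟩, ⟨h2, -⟩, h3⟩, h4, h5, h6⟩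
        subst h1
        have q := h.mp ⟨⟨⟨h2, trivial⟩, h3⟩, h5, h6⟩
        exact ⟨⟨rfl, h4, q.1.2.1, q.1.2.2⟩, h2.symm, q.2⟩
      · rintro ⟨⟨h1, h4, h5, h6⟩, h7, h8⟩
        subst h1
        have q := h.mpr ⟨⟨h7.symm, h5, h6⟩, h8⟩
        exact ⟨⟨⟨rfl, trivial⟩, ⟨h7.symm, trivial⟩, q.1.2⟩, h4, q.2.1, q.2.2⟩

lemma alt_char (route : List (Int × Int)) :
    valid_route_alt route =
      ((route.all (fun e => e.1 != e.2)) &&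
       ((route.zip route.tail).all (fun pq => pq.1.2 == pq.2.1))) := by
  cases route with
  | nil => rfl
  | cons e rest =>
    show ((e :: rest == ((e.1 :: (e :: rest).map Prod.snd).zip ((e.1 :: (e :: rest).map Prod.snd)).tail)) &&
      (((e.1 :: (e :: rest).map Prod.snd).zip ((e.1 :: (e :: rest).map Prod.snd)).tail).all (fun p => p.1 != p.2))) = _
    rw [List.tail_cons, alt_aux e.1 (e :: rest)]
    simp

-- ===== VERDICT (by name: the statement is the Claim_ definition above) =====
theorem valid_route_spec : Claim_equal_valid_route := by
  intro route _
  unfold Spec_valid_route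
  rw [valid_route_char, alt_char]
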